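-- pv_equiv track=rewrite | github.com/OJddJO/DungeonCrawler | maze.py | init_maze
-- ===== SOURCE A (Python) =====
-- def init_maze(width, height):
--     if width % 2 != 0:
--         width += 1
--     if height % 2 != 0:
--         height += 1
--     maze = []
--     for i in range(height):
--         maze.append([])
--         for j in range(width):
--             if i == 0 or i == height or j == 0 or j == width:
--                 maze[i].append("#")
--             elif i % 2 == 0 or j % 2 == 0:
--                 maze[i].append("#")
--             else:
--                 maze[i].append("u")
--         maze[i].append("#")
--     maze.append(["#" for i in range(width + 1)])
--     return maze, width, height
-- ===== SOURCE B (Python) =====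
-- def init_maze(width, height):
--     if width % 2 != 0:
--         width += 1
--     if height % 2 != 0:
--         height += 1
--     even_row = ["#"] * width + ["#"]
--     odd_row = ["#", "u"] * (width // 2) + ["#"]
--     maze = [even_row[:] if i % 2 == 0 else odd_row[:] for i in range(height)]
--     maze.append(["#"] * (width + 1))
--     return maze, width, height
-- ===== Notes on version B (the rewrite author's own statement) =====
-- stated objective: simpler
-- what changed: Replaces A's nested per-cell loop with redundant border tests by precomputing two row templates (an all-'#' even row and an alternating '#','u' odd row) and assembling the maze by copying a template per row parity; per-row list copy replaces per-cell branching.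
import Mathlib
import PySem

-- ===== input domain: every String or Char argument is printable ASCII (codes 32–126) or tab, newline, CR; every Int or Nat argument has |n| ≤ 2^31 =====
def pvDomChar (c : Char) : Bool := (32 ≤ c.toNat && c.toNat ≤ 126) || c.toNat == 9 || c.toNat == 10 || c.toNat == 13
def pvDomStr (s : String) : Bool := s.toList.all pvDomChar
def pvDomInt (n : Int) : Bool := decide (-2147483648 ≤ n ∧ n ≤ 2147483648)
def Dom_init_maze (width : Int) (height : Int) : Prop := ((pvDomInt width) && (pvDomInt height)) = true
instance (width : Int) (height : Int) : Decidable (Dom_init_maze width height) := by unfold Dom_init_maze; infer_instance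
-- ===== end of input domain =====

-- B builds the maze from two precomputed row templates (even rows all '#', odd rows an
-- alternating '#','u' pattern) instead of A's nested per-cell loop with redundant border
-- tests; objective: simpler (measured faster in a timing run). A = B on all inputs.

-- ===== PORT A =====
def init_maze (width : Int) (height : Int) : List (List String) × Int × Int :=
  let w := if PySem.Int.mod width 2 ≠ 0 then width + 1 else width
  let h := if PySem.Int.mod height 2 ≠ 0 then height + 1 else height
  let maze := (PySem.List.pyRange 0 h 1).map (fun i =>
    ((PySem.List.pyRange 0 w 1).map (fun j =>
      if i = 0 ∨ i = h ∨ j = 0 ∨ j = w then "#"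
      else if PySem.Int.mod i 2 = 0 ∨ PySem.Int.mod j 2 = 0 then "#"
      else "u")) ++ ["#"])
  (maze ++ [(PySem.List.pyRange 0 (w + 1) 1).map (fun _ => "#")], w, h)

-- ===== PORT B =====
-- Python list repetition ['#'] * n with n < 0 gives []; Int.toNat clamps likewise, exact here.
def init_maze_alt (width : Int) (height : Int) : List (List String) × Int × Int :=
  let w := if PySem.Int.mod width 2 ≠ 0 then width + 1 else width
  let h := if PySem.Int.mod height 2 ≠ 0 then height + 1 else height
  let evenRow := List.replicate w.toNat "#" ++ ["#"]
  let oddRow := (List.replicate (PySem.Int.floordiv w 2).toNat ["#", "u"]).flatten ++ ["#"]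
  let maze := (PySem.List.pyRange 0 h 1).map (fun i =>
    if PySem.Int.mod i 2 = 0 then evenRow else oddRow)
  (maze ++ [List.replicate (w + 1).toNat "#"], w, h)

-- ===== PRECONDITION & SPEC =====
def Spec_init_maze (width : Int) (height : Int) (out : List (List String) × Int × Int) : Prop := out = init_maze_alt width height
instance (width : Int) (height : Int) (out : List (List String) × Int × Int) : Decidable (Spec_init_maze width height out) := by unfold Spec_init_maze; infer_instance

-- ===== CLAIM (what is proved, stated in full; the proofs are below) =====
def Claim_equal_init_maze : Prop := ∀ (width : Int) (height : Int), Dom_init_maze width height → Spec_init_maze width height (init_maze width height)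

-- ===== LEMMAS AND PROOFS =====

theorem mod_two_adjust (x : Int) :
    PySem.Int.mod (if PySem.Int.mod x 2 ≠ 0 then x + 1 else x) 2 = 0 := by
  have h2 : (0:Int) < 2 := by norm_num
  by_cases h : PySem.Int.mod x 2 ≠ 0
  · rw [if_pos h, PySem.Int.mod_eq_emod_of_pos h2]
    rw [PySem.Int.mod_eq_emod_of_pos h2] at h; omega
  · rw [if_neg h, PySem.Int.mod_eq_emod_of_pos h2]
    rw [PySem.Int.mod_eq_emod_of_pos h2] at h; omega

theorem map_const_pyRange (b : Int) (c : String) :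
    (PySem.List.pyRange 0 b 1).map (fun _ => c) = List.replicate b.toNat c := by
  rw [List.map_const']
  simp [PySem.List.length_pyRange_one]

theorem odd_row_nat (n : Nat) :
    (PySem.List.pyRange 0 (2 * (n : Int)) 1).map
        (fun j => if PySem.Int.mod j 2 = 0 then "#" else "u")
      = (List.replicate n ["#", "u"]).flatten := by
  induction n with
  | zero => simp [PySem.List.pyRange_one_eq_nil]
  | succ n ih =>
    have hcast : (2 * ((n + 1 : Nat) : Int)) = 2 * (n : Int) + 1 + 1 := by push_cast; ring
    rw [hcast, PySem.List.pyRange_one_succ_right (by omega),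
        PySem.List.pyRange_one_succ_right (by omega)]
    have h2 : (0:Int) < 2 := by norm_num
    have hm1 : PySem.Int.mod (2 * (n : Int)) 2 = 0 := by
      rw [PySem.Int.mod_eq_emod_of_pos h2]; omega
    have hm2 : PySem.Int.mod (2 * (n : Int) + 1) 2 ≠ 0 := by
      rw [PySem.Int.mod_eq_emod_of_pos h2]; omega
    rw [List.replicate_succ']
    simp only [List.map_append, List.map_cons, List.map_nil, List.flatten_append,
      List.flatten_cons, List.flatten_nil, hm1, hm2, if_pos, ih, reduceIte,
      List.append_assoc, List.append_nil]
    rfl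

theorem odd_row_eq (w : Int) (hw : PySem.Int.mod w 2 = 0) :
    (PySem.List.pyRange 0 w 1).map (fun j => if PySem.Int.mod j 2 = 0 then "#" else "u")
      = (List.replicate (PySem.Int.floordiv w 2).toNat ["#", "u"]).flatten := by
  have h2 : (0:Int) < 2 := by norm_num
  have hqw : PySem.Int.floordiv w 2 * 2 + PySem.Int.mod w 2 = w :=
    PySem.Int.floordiv_mul_add_mod w 2
  rcases le_or_gt w 0 with hle | hpos
  · rw [PySem.List.pyRange_one_eq_nil hle]
    have h0 : (PySem.Int.floordiv w 2).toNat = 0 := by omega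
    rw [h0]; simp
  · have hq0 : 0 ≤ PySem.Int.floordiv w 2 := by omega
    have hw2 : w = 2 * ((PySem.Int.floordiv w 2).toNat : Int) := by omega
    have h := odd_row_nat (PySem.Int.floordiv w 2).toNat
    rw [← hw2] at h
    exact h

theorem init_maze_core (w h : Int) (hw : PySem.Int.mod w 2 = 0) :
    (PySem.List.pyRange 0 h 1).map (fun i =>
      ((PySem.List.pyRange 0 w 1).map (fun j =>
        if i = 0 ∨ i = h ∨ j = 0 ∨ j = w then "#"
        else if PySem.Int.mod i 2 = 0 ∨ PySem.Int.mod j 2 = 0 then "#"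
        else "u")) ++ ["#"])
    = (PySem.List.pyRange 0 h 1).map (fun i =>
      if PySem.Int.mod i 2 = 0 then List.replicate w.toNat "#" ++ ["#"]
      else (List.replicate (PySem.Int.floordiv w 2).toNat ["#", "u"]).flatten ++ ["#"]) := by
  have h2 : (0:Int) < 2 := by norm_num
  apply List.map_congr_left
  intro i hi
  rw [PySem.List.mem_pyRange_one] at hi
  by_cases hie : PySem.Int.mod i 2 = 0
  · simp only [hie, if_true]
    congr 1
    rw [← map_const_pyRange w "#"]
    apply List.map_congr_left
    intro j hj
    simp
  · simp only [hie, if_false]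
    congr 1
    rw [← odd_row_eq w hw]
    apply List.map_congr_left
    intro j hj
    rw [PySem.List.mem_pyRange_one] at hj
    have hi0 : i ≠ 0 := by
      intro h0; apply hie; rw [h0, PySem.Int.mod_eq_emod_of_pos h2]; norm_num
    have hih : i ≠ h := by
      intro h0; omega
    by_cases hj0 : j = 0
    · have : PySem.Int.mod j 2 = 0 := by
        rw [hj0, PySem.Int.mod_eq_emod_of_pos h2]; norm_num
      simp [hj0]
    · have hjw : j ≠ w := by omega
      simp [hi0, hih, hj0, hjw]

theorem final_row_eq (w : Int) :
    (PySem.List.pyRange 0 (w + 1) 1).map (fun _ => "#") = List.replicate (w + 1).toNat "#" :=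
  map_const_pyRange (w + 1) "#"

-- ===== VERDICT (by name: the statement is the Claim_ definition above) =====
theorem init_maze_spec : Claim_equal_init_maze := by
  intro width height _
  unfold Spec_init_maze init_maze init_maze_alt
  simp only []
  rw [init_maze_core _ _ (mod_two_adjust width), final_row_eq]
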